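-- pv_equiv track=rewrite | github.com/Danielmc09/pruebaHABI | Segundo ejercicio/bloques_ordenados.py | ordenar_bloques
-- ===== SOURCE A (Python) =====
-- def ordenar_bloques(arreglo):
--     bloques = []  # Para almacenar los bloques de números
--     bloque_actual = []  # Para construir el bloque actual
--
--     for numero in arreglo:
--         if numero == 0:  # Encuentra el fin de un bloque
--             if bloque_actual:
--                 # Si hay números en el bloque actual, lo ordena y lo guarda
--                 bloques.append("".join(map(str, sorted(bloque_actual))))
--                 bloque_actual = []  # Reinicia el bloque actual para el siguiente
--             else:
--                 # Si el bloque actual está vacío (dos ceros consecutivos)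
--                 bloques.append("X")
--         else:
--             # Agrega el número al bloque actual
--             bloque_actual.append(numero)
--
--     # Asegura que el último bloque se procese (en caso de que el arreglo no termine en cero)
--     if bloque_actual:
--         bloques.append("".join(map(str, sorted(bloque_actual))))
--
--     # Une los bloques ordenados en un string, separados por espacio
--     return " ".join(bloques)
-- ===== SOURCE B (Python) =====
-- def ordenar_bloques(arreglo):
--     # Tag every nonzero element with the number of zeros seen before it,
--     # then ONE global lexicographic sort groups the blocks and orders each
--     # block's values at once; a final scan over block ids emits the tokens.
--     pairs = []
--     z = 0
--     for v in arreglo: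
--         if v == 0:
--             z += 1
--         else:
--             pairs.append((z, v))
--     pairs.sort()
--     out = []
--     i = 0
--     for b in range(z + 1):
--         parts = []
--         while i < len(pairs) and pairs[i][0] == b:
--             parts.append(str(pairs[i][1]))
--             i += 1
--         if parts:
--             out.append("".join(parts))
--         elif b < z:
--             out.append("X")
--     return " ".join(out)
-- ===== Notes on version B (the rewrite author's own statement) =====
-- stated objective: alternative
-- what changed: Instead of A's per-block buffering with one sort per block, B tags each nonzero element with the count of zeros preceding it, performs ONE global lexicographic sort of (block_id, value) pairs, and then emits tokens by scanning block ids, so no block list is ever materialised.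
import Mathlib
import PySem

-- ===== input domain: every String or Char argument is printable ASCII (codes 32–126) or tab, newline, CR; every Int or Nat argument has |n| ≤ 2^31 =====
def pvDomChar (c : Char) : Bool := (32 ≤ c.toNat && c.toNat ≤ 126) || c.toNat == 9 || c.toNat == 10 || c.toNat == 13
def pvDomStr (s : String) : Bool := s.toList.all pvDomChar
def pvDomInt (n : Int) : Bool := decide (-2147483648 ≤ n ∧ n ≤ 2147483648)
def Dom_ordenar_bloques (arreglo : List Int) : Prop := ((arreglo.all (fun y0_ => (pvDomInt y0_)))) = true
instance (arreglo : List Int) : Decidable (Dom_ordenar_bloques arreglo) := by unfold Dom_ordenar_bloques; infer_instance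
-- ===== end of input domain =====

-- B replaces A's per-block buffer-and-sort by tagging each nonzero element with the number of
-- zeros before it, ONE global lexicographic sort of the (block_id, value) pairs, and a scan
-- over block ids that emits the tokens (alternative algorithm, same asymptotic cost).

-- "".join(map(str, sorted(b))) — A's rendering of a block
def renderBlock (b : List Int) : String :=
  PySem.Str.join "" ((PySem.List.sorted b (fun x => x) false).map PySem.Int.toStr)

-- ===== PORT A =====
-- loop body of A: flush the running block at a zero, else extend it
def stepA (st : List String × List Int) (numero : Int) : List String × List Int :=
  if numero = 0 then
    if st.2 ≠ [] then (st.1 ++ [renderBlock st.2], [])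
    else (st.1 ++ ["X"], [])
  else (st.1, st.2 ++ [numero])

-- the post-loop flush of the last block
def finishA (st : List String × List Int) : List String :=
  if st.2 ≠ [] then st.1 ++ [renderBlock st.2] else st.1

def ordenar_bloques (arreglo : List Int) : String :=
  PySem.Str.join " " (finishA (arreglo.foldl stepA ([], [])))

-- ===== PORT B =====
-- first loop of Source B: collect (zeros-so-far, value) pairs and the zero count
def stepTag (st : List (Int × Int) × Int) (v : Int) : List (Int × Int) × Int :=
  if v = 0 then (st.1, st.2 + 1) else (st.1 ++ [(st.2, v)], st.2)

-- the inner while loop of Source B: advance the cursor i over the pairs tagged b, stringifying values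
def takeGroup (pairs : List (Int × Int)) (b : Int) (i : Nat) (parts : List String) :
    Nat × List String :=
  if h : i < pairs.length then
    if pairs[i].1 = b then
      takeGroup pairs b (i + 1) (parts ++ [PySem.Int.toStr pairs[i].2])
    else (i, parts)
  else (i, parts)
termination_by pairs.length - i

-- body of Source B's 'for b in range(z + 1)' loop, state = (out, i)
def stepEmit (z : Int) (pairs : List (Int × Int)) (st : List String × Nat) (b : Int) :
    List String × Nat :=
  let g := takeGroup pairs b st.2 []
  if g.2 ≠ [] then (st.1 ++ [PySem.Str.join "" g.2], g.1)
  else if b < z then (st.1 ++ ["X"], g.1)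
  else (st.1, g.1)

def ordenar_bloques_alt (arreglo : List Int) : String :=
  let t := arreglo.foldl stepTag ([], 0)
  let pairs := PySem.List.sorted2 t.1 Prod.fst Prod.snd false
  let out := (PySem.List.pyRange 0 (t.2 + 1) 1).foldl (stepEmit t.2 pairs) ([], 0)
  PySem.Str.join " " out.1

-- ===== PRECONDITION & SPEC =====
def Spec_ordenar_bloques (arreglo : List Int) (out : String) : Prop := out = ordenar_bloques_alt arreglo
instance (arreglo : List Int) (out : String) : Decidable (Spec_ordenar_bloques arreglo out) := by unfold Spec_ordenar_bloques; infer_instance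

-- ===== CLAIM (what is proved, stated in full; the proofs are below) =====
def Claim_equal_ordenar_bloques : Prop := ∀ (arreglo : List Int), Dom_ordenar_bloques arreglo → Spec_ordenar_bloques arreglo (ordenar_bloques arreglo)

-- ===== LEMMAS AND PROOFS =====

-- the zero-separated segments of the input, empties kept (proof-side common backbone)
def splitZeros : List Int → List (List Int)
  | [] => [[]]
  | x :: xs =>
    if x = 0 then [] :: splitZeros xs
    else
      match splitZeros xs with
      | [] => [[x]]
      | s :: rest => (x :: s) :: rest

-- the token stream both programs produce, read off the segment list
def tokB : List (List Int) → List String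
  | [] => []
  | [s] => if s = [] then [] else [renderBlock s]
  | s :: t :: r => (if s = [] then "X" else renderBlock s) :: tokB (t :: r)

-- token stream of A's pass, with the running block as state
def tokA : List Int → List Int → List String
  | [], cur => if cur ≠ [] then [renderBlock cur] else []
  | x :: xs, cur =>
    if x = 0 then (if cur ≠ [] then renderBlock cur else "X") :: tokA xs []
    else tokA xs (cur ++ [x])

-- B's tagged pairs, read off the segment list (tags from z upward)
def tagOf (z : Int) : List (List Int) → List (Int × Int)
  | [] => []
  | s :: r => s.map (fun v => (z, v)) ++ tagOf (z + 1) r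

-- the globally sorted pairs, read off the segment list
def tagOfSorted (z : Int) : List (List Int) → List (Int × Int)
  | [] => []
  | s :: r => (PySem.List.sorted s (fun x => x) false).map (fun v => (z, v)) ++ tagOfSorted (z + 1) r

theorem splitZeros_ne_nil (xs : List Int) : splitZeros xs ≠ [] := by
  cases xs with
  | nil => simp [splitZeros]
  | cons x xs =>
    simp only [splitZeros]
    split
    · simp
    · cases h : splitZeros xs <;> simp

-- ===== A-side =====

theorem foldA_eq_tokA (xs : List Int) (bl : List String) (cur : List Int) :
    finishA (xs.foldl stepA (bl, cur)) = bl ++ tokA xs cur := by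
  induction xs generalizing bl cur with
  | nil => simp only [List.foldl_nil, finishA, tokA]; split <;> simp
  | cons x xs ih =>
    simp only [List.foldl_cons, tokA]
    by_cases hx : x = 0
    · by_cases hc : cur = []
      · rw [show stepA (bl, cur) x = (bl ++ ["X"], []) by simp [stepA, hx, hc], ih]
        simp [hc, hx]
      · rw [show stepA (bl, cur) x = (bl ++ [renderBlock cur], []) by simp [stepA, hx, hc], ih]
        simp [hc, hx]
    · rw [show stepA (bl, cur) x = (bl, cur ++ [x]) by simp [stepA, hx], ih]
      simp [hx]

theorem tokB_eq_tokA (xs : List Int) (cur : List Int) (s0 : List Int) (rest : List (List Int))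
    (h : splitZeros xs = s0 :: rest) : tokB ((cur ++ s0) :: rest) = tokA xs cur := by
  induction xs generalizing cur s0 rest with
  | nil =>
    simp only [splitZeros] at h
    cases h
    by_cases hc : cur = [] <;> simp [tokB, tokA, hc]
  | cons x xs ih =>
    simp only [splitZeros] at h
    by_cases hx : x = 0
    · simp only [hx] at h
      cases hs : splitZeros xs with
      | nil => exact absurd hs (splitZeros_ne_nil xs)
      | cons t0 trest =>
        rw [hs] at h
        cases h
        have := ih [] _ _ hs
        simp only [List.nil_append] at this
        by_cases hc : cur = [] <;> simp [tokB, tokA, hx, this, hc]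
    · simp only [hx] at h
      cases hs : splitZeros xs with
      | nil => exact absurd hs (splitZeros_ne_nil xs)
      | cons t0 trest =>
        rw [hs] at h
        cases h
        have := ih (cur ++ [x]) _ _ hs
        simpa [tokA, hx, List.append_assoc] using this

-- ===== B-side: the tagging pass =====

theorem foldTag_eq (xs : List Int) (ps : List (Int × Int)) (z : Int) :
    xs.foldl stepTag (ps, z) = (ps ++ tagOf z (splitZeros xs), z + (xs.count 0 : Int)) := by
  induction xs generalizing ps z with
  | nil => simp [splitZeros, tagOf]
  | cons x xs ih =>
    simp only [List.foldl_cons, splitZeros]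
    by_cases hx : x = 0
    · rw [show stepTag (ps, z) x = (ps, z + 1) by simp [stepTag, hx], ih]
      simp only [hx, if_true, List.count_cons, Prod.mk.injEq, tagOf, List.map_nil,
        List.nil_append, true_and]
      push_cast
      simp only [if_pos trivial]
      ring
    · cases hs : splitZeros xs with
      | nil => exact absurd hs (splitZeros_ne_nil xs)
      | cons s r =>
        rw [show stepTag (ps, z) x = (ps ++ [(z, x)], z) by simp [stepTag, hx], ih]
        simp only [if_neg hx, hs, tagOf, List.count_cons, Prod.mk.injEq, List.map_cons,
          List.cons_append, List.append_assoc]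
        simp [hx]

theorem length_splitZeros (xs : List Int) :
    (splitZeros xs).length = xs.count 0 + 1 := by
  induction xs with
  | nil => simp [splitZeros]
  | cons x xs ih =>
    simp only [splitZeros, List.count_cons]
    by_cases hx : x = 0
    · simp [hx, ih]
    · cases hs : splitZeros xs with
      | nil => exact absurd hs (splitZeros_ne_nil xs)
      | cons s r => rw [hs] at ih; simp_all

-- ===== B-side: the global sort =====

theorem sorted2_eq_sorted_lex (xs : List (Int × Int)) :
    PySem.List.sorted2 xs Prod.fst Prod.snd false
      = PySem.List.sorted xs (fun p => toLex p) false := by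
  rw [PySem.List.sorted_eq_foldl_insertBy]
  show List.foldl (fun acc x => PySem.List.insertBy
      (fun a b => decide (a.1 < b.1) || (!decide (b.1 < a.1) && decide (a.2 < b.2))) x acc) [] xs
    = List.foldl (fun acc x => PySem.List.insertBy
      (fun a b => decide ((toLex a : Lex (Int × Int)) < toLex b)) x acc) [] xs
  congr 1
  funext acc x
  congr 1
  funext a b
  by_cases h1 : a.1 < b.1 <;> by_cases h2 : b.1 < a.1 <;> by_cases h3 : a.2 < b.2 <;>
    simp [Prod.Lex.toLex_lt_toLex, h1, h2, h3] <;> omega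

theorem mem_tagOfSorted_fst {p : Int × Int} (z : Int) (S : List (List Int))
    (h : p ∈ tagOfSorted z S) : z ≤ p.1 := by
  induction S generalizing z with
  | nil => simp [tagOfSorted] at h
  | cons s r ih =>
    simp only [tagOfSorted, List.mem_append, List.mem_map] at h
    rcases h with ⟨v, _, hv⟩ | h
    · simp [← hv]
    · have := ih (z + 1) h; omega

theorem tagOfSorted_pairwise (z : Int) (S : List (List Int)) :
    (tagOfSorted z S).Pairwise (fun a b => (toLex a : Lex (Int × Int)) ≤ toLex b) := by
  induction S generalizing z with
  | nil => simp [tagOfSorted]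
  | cons s r ih =>
    simp only [tagOfSorted]
    refine List.pairwise_append.mpr ⟨?_, ih (z + 1), ?_⟩
    · refine List.pairwise_map.mpr ?_
      refine (PySem.List.sorted_pairwise s (fun x => x)).imp ?_
      intro a b hab
      exact Prod.Lex.toLex_le_toLex.mpr (Or.inr ⟨rfl, hab⟩)
    · intro a ha b hb
      rcases List.mem_map.mp ha with ⟨v, _, hv⟩
      have hbz := mem_tagOfSorted_fst (z + 1) r hb
      refine Prod.Lex.toLex_le_toLex.mpr (Or.inl ?_)
      rw [← hv]; simpa using by omega

theorem tagOfSorted_perm (z : Int) (S : List (List Int)) :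
    (tagOfSorted z S).Perm (tagOf z S) := by
  induction S generalizing z with
  | nil => simp [tagOfSorted, tagOf]
  | cons s r ih =>
    exact List.Perm.append
      ((PySem.List.sorted_perm s (fun x => x) false).map _) (ih (z + 1))

theorem sorted_tagOf (z : Int) (S : List (List Int)) :
    PySem.List.sorted2 (tagOf z S) Prod.fst Prod.snd false = tagOfSorted z S := by
  rw [sorted2_eq_sorted_lex]
  refine PySem.List.eq_of_perm_of_pairwise_le_of_injective
    (fun p : Int × Int => toLex p) toLex.injective ?_ ?_ ?_
  · exact ((PySem.List.sorted_perm _ _ false).trans (tagOfSorted_perm z S).symm)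
  · exact PySem.List.sorted_pairwise _ _
  · exact tagOfSorted_pairwise z S

-- ===== B-side: the emit loop =====

theorem takeGroup_group (P : List (Int × Int)) (b : Int) (i : Nat) (parts : List String)
    (l : List Int) (T : List (Int × Int))
    (hdrop : P.drop i = l.map (fun v => (b, v)) ++ T) (hT : ∀ p ∈ T, p.1 ≠ b) :
    takeGroup P b i parts = (i + l.length, parts ++ l.map PySem.Int.toStr) := by
  induction l generalizing i parts with
  | nil =>
    simp only [List.map_nil, List.nil_append] at hdrop
    rw [takeGroup]
    cases hT' : T with
    | nil =>
      rw [hT'] at hdrop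
      rw [dif_neg (by have := List.drop_eq_nil_iff.mp hdrop; omega)]
      simp
    | cons p t =>
      rw [hT'] at hdrop
      have h : i < P.length := by
        by_contra hcon
        rw [List.drop_eq_nil_iff.mpr (by omega)] at hdrop
        exact List.cons_ne_nil _ _ hdrop.symm
      have hPi : P[i] = p := by
        rw [List.drop_eq_getElem_cons h] at hdrop
        exact (List.cons.injEq _ _ _ _ ▸ hdrop).1
      rw [dif_pos h, if_neg (by rw [hPi]; exact hT p (by simp [hT']))]
      simp
  | cons v l ih =>
    have h : i < P.length := by
      by_contra hcon
      rw [List.drop_eq_nil_iff.mpr (by omega)] at hdrop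
      simp at hdrop
    rw [List.drop_eq_getElem_cons h] at hdrop
    simp only [List.map_cons, List.cons_append, List.cons.injEq] at hdrop
    obtain ⟨hPi, hdrop'⟩ := hdrop
    rw [takeGroup, dif_pos h, if_pos (by rw [hPi])]
    rw [ih (i + 1) _ hdrop']
    simp [hPi]
    omega

theorem emit_eq_tokB (P : List (Int × Int)) (S : List (List Int)) (b z : Int)
    (out : List String) (i : Nat)
    (hdrop : P.drop i = tagOfSorted b S) (hz : z + 1 = b + S.length) :
    ((PySem.List.pyRange b (z + 1) 1).foldl (stepEmit z P) (out, i)).1 = out ++ tokB S := by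
  induction S generalizing b out i with
  | nil =>
    rw [PySem.List.pyRange_one_eq_nil (by simp only [List.length_nil, Int.natCast_zero] at hz; omega)]
    simp [tokB]
  | cons s r ih =>
    have hlt : b < z + 1 := by simp only [List.length_cons] at hz; push_cast at hz; omega
    rw [PySem.List.pyRange_one_cons hlt]
    simp only [List.foldl_cons]
    simp only [tagOfSorted] at hdrop
    have htg : takeGroup P b i []
        = (i + (PySem.List.sorted s (fun x => x) false).length,
           (PySem.List.sorted s (fun x => x) false).map PySem.Int.toStr) := by
      have := takeGroup_group P b i [] (PySem.List.sorted s (fun x => x) false)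
        (tagOfSorted (b + 1) r) hdrop
        (fun p hp => by have := mem_tagOfSorted_fst (b + 1) r hp; omega)
      simpa using this
    have hdrop' : P.drop (i + (PySem.List.sorted s (fun x => x) false).length)
        = tagOfSorted (b + 1) r := by
      rw [← List.drop_drop, hdrop]
      rw [show (PySem.List.sorted s (fun x => x) false).length
            = ((PySem.List.sorted s (fun x => x) false).map (fun v => (b, v))).length by simp]
      exact List.drop_left
    by_cases hs : s = []
    · have hemp : (PySem.List.sorted s (fun x => x) false).map PySem.Int.toStr = [] := by
        simp [(PySem.List.sorted_eq_nil_iff s _ false).mpr hs]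
      cases r with
      | nil =>
        have hbz : ¬ b < z := by simp only [List.length_cons, List.length_nil] at hz; push_cast at hz; omega
        rw [show stepEmit z P (out, i) b
            = (out, i + (PySem.List.sorted s (fun x => x) false).length) by
          simp [stepEmit, htg, hemp, hbz]]
        have := ih (b + 1) out _ hdrop' (by
          simp only [List.length_cons, List.length_nil] at hz ⊢
          push_cast at hz ⊢; omega)
        simpa [tokB, hs] using this
      | cons t r' =>
        have hbz : b < z := by simp only [List.length_cons] at hz; push_cast at hz; omega
        rw [show stepEmit z P (out, i) b
            = (out ++ ["X"], i + (PySem.List.sorted s (fun x => x) false).length) by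
          simp [stepEmit, htg, hemp, hbz]]
        have := ih (b + 1) (out ++ ["X"]) _ hdrop' (by
          simp only [List.length_cons] at hz ⊢
          push_cast at hz ⊢; omega)
        simpa [tokB, hs] using this
    · have hne : (PySem.List.sorted s (fun x => x) false).map PySem.Int.toStr ≠ [] := by
        simp [(PySem.List.sorted_eq_nil_iff s _ false).ne, hs]
      rw [show stepEmit z P (out, i) b
          = (out ++ [renderBlock s], i + (PySem.List.sorted s (fun x => x) false).length) by
        simp only [stepEmit, htg]
        simp [hne, renderBlock]]
      have := ih (b + 1) (out ++ [renderBlock s]) _ hdrop' (by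
        simp only [List.length_cons] at hz ⊢
        push_cast at hz ⊢; omega)
      cases r with
      | nil => simpa [tokB, hs] using this
      | cons t r' => simpa [tokB, hs] using this

-- ===== VERDICT (by name: the statement is the Claim_ definition above) =====
theorem ordenar_bloques_spec : Claim_equal_ordenar_bloques := by
  intro arreglo _
  unfold Spec_ordenar_bloques ordenar_bloques ordenar_bloques_alt
  cases hs : splitZeros arreglo with
  | nil => exact absurd hs (splitZeros_ne_nil arreglo)
  | cons s0 rest =>
    have hA := foldA_eq_tokA arreglo [] []
    have hB := tokB_eq_tokA arreglo [] s0 rest hs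
    have hT := foldTag_eq arreglo [] 0
    have hL := length_splitZeros arreglo
    have hS := sorted_tagOf 0 (splitZeros arreglo)
    have hE := emit_eq_tokB (tagOfSorted 0 (splitZeros arreglo)) (splitZeros arreglo) 0
      (arreglo.count 0 : Int) [] 0 (by simp) (by push_cast [hL]; ring)
    simp only [List.nil_append, zero_add] at hA hB hT
    rw [hA, ← hB, hT]
    simp only [hS, hE, List.nil_append]
    rw [hs]
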